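-- pv_equiv track=rewrite | github.com/yunchien77/3D-pose-estimation-STCFormer | code/para_calculate/para/para_auto_xlsx.py | filter_stable_regions
-- ===== SOURCE A (Python) =====
-- def filter_stable_regions(time, elec, begin_angle, rest_angle, begin_tolerance=15, rest_tolerance=4):
--     """
--     只過濾序列開頭和結尾的平穩區段
--
--     Parameters:
--     - time: 時間序列
--     - elec: 角度序列
--     - begin_angle: 起始角度
--     - rest_angle: 靜息角度
--     - tolerance: 判定為平穩區域的閾值
--
--     Returns:
--     - filtered_time: 過濾後的時間序列
--     - filtered_elec: 過濾後的角度序列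
--     """
--     # 找出序列開頭的平穩區段結束點
--     start_idx = 0
--     for i in range(len(elec)):
--         if abs(elec[i] - begin_angle) > begin_tolerance:
--             start_idx = i
--             break
--
--     # 從後往前找出序列結尾的平穩區段起始點
--     end_idx = len(elec) - 1
--     for i in range(len(elec)-1, -1, -1):
--         if abs(elec[i] - rest_angle) > rest_tolerance:
--             end_idx = i
--             break
--
--     # 過濾數據
--     filtered_time = time[start_idx:end_idx+1]
--     filtered_elec = elec[start_idx:end_idx+1]
--
--     return filtered_time, filtered_elec
-- ===== SOURCE B (Python) =====
-- def filter_stable_regions(time, elec, begin_angle, rest_angle, begin_tolerance=15, rest_tolerance=4):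
--     # Single forward pass maintaining both trim indices at once.
--     start_idx = 0
--     found_start = False
--     end_idx = len(elec) - 1
--     for i, v in enumerate(elec):
--         if not found_start and abs(v - begin_angle) > begin_tolerance:
--             start_idx = i
--             found_start = True
--         if abs(v - rest_angle) > rest_tolerance:
--             end_idx = i
--     return time[start_idx:end_idx + 1], elec[start_idx:end_idx + 1]
-- ===== Notes on version B (the rewrite author's own statement) =====
-- stated objective: alternative
-- what changed: A's two separate opposite-direction scans (forward break-scan for the start index, backward break-scan for the end index) are replaced by a single forward pass over enumerate(elec) that maintains the start index (set once) and the end index (last far-from-rest index) together.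
import Mathlib
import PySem

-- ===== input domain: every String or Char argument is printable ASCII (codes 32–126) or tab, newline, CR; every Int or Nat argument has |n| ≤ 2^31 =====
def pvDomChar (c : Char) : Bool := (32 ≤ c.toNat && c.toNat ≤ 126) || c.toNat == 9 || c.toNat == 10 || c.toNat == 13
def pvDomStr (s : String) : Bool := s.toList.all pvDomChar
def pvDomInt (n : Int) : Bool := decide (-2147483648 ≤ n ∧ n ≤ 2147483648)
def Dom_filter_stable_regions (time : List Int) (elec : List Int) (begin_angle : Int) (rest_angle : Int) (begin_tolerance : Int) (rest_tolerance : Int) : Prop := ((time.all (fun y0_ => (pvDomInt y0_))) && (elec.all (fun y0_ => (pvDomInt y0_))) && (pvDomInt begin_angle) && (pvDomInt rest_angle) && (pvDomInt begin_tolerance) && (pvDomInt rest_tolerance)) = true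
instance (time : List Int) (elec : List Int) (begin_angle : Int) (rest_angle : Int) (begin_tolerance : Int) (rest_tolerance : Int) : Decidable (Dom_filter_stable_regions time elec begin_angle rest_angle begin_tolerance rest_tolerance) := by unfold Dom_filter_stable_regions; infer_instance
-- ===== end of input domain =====

-- B replaces A's two opposite-direction index scans by one forward pass over
-- enumerate(elec) that maintains both trim indices at once (objective: alternative, single pass).

-- ===== PORT A =====
-- A's 'for i in range(…): if abs(elec[i]-ang) > tol: idx = i; break' loop, with default d:
def pvFindFirst (idxs : List Int) (elec : List Int) (ang : Int) (tol : Int) (d : Int) : Int :=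
  match idxs with
  | [] => d
  | i :: rest =>
      if tol < |PySem.List.pyGetD elec i 0 - ang| then i
      else pvFindFirst rest elec ang tol d

def filter_stable_regions (time : List Int) (elec : List Int) (begin_angle : Int) (rest_angle : Int) (begin_tolerance : Int) (rest_tolerance : Int) : List Int × List Int :=
  let n : Int := elec.length
  let start_idx := pvFindFirst (PySem.List.pyRange 0 n 1) elec begin_angle begin_tolerance 0
  let end_idx := pvFindFirst (PySem.List.pyRange (n - 1) (-1) (-1)) elec rest_angle rest_tolerance (n - 1)
  (PySem.List.slice time (some start_idx) (some (end_idx + 1)), PySem.List.slice elec (some start_idx) (some (end_idx + 1)))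

-- ===== PORT B =====
-- the body of B's single 'for i, v in enumerate(elec)' loop; state = (start_idx, found_start, end_idx)
def pvStep (begin_angle rest_angle begin_tolerance rest_tolerance : Int) (s : Int × Bool × Int) (iv : Int × Int) : Int × Bool × Int :=
  let s1 := if !s.2.1 && decide (begin_tolerance < |iv.2 - begin_angle|) then (iv.1, true, s.2.2) else s
  if rest_tolerance < |iv.2 - rest_angle| then (s1.1, s1.2.1, iv.1) else s1

def filter_stable_regions_alt (time : List Int) (elec : List Int) (begin_angle : Int) (rest_angle : Int) (begin_tolerance : Int) (rest_tolerance : Int) : List Int × List Int :=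
  let st := (PySem.List.enumerate elec 0).foldl (pvStep begin_angle rest_angle begin_tolerance rest_tolerance)
              (0, false, (elec.length : Int) - 1)
  (PySem.List.slice time (some st.1) (some (st.2.2 + 1)), PySem.List.slice elec (some st.1) (some (st.2.2 + 1)))

-- ===== PRECONDITION & SPEC =====
def Spec_filter_stable_regions (time : List Int) (elec : List Int) (begin_angle : Int) (rest_angle : Int) (begin_tolerance : Int) (rest_tolerance : Int) (out : List Int × List Int) : Prop := out = filter_stable_regions_alt time elec begin_angle rest_angle begin_tolerance rest_tolerance
instance (time : List Int) (elec : List Int) (begin_angle : Int) (rest_angle : Int) (begin_tolerance : Int) (rest_tolerance : Int) (out : List Int × List Int) : Decidable (Spec_filter_stable_regions time elec begin_angle rest_angle begin_tolerance rest_tolerance out) := by unfold Spec_filter_stable_regions; infer_instance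

-- ===== CLAIM (what is proved, stated in full; the proofs are below) =====
def Claim_equal_filter_stable_regions : Prop := ∀ (time : List Int) (elec : List Int) (begin_angle : Int) (rest_angle : Int) (begin_tolerance : Int) (rest_tolerance : Int), Dom_filter_stable_regions time elec begin_angle rest_angle begin_tolerance rest_tolerance → Spec_filter_stable_regions time elec begin_angle rest_angle begin_tolerance rest_tolerance (filter_stable_regions time elec begin_angle rest_angle begin_tolerance rest_tolerance)

-- ===== LEMMAS AND PROOFS =====

-- reference: first index ≥ k (in xs, offset k) whose element is tol-far from ang, else d
def fwSpec (ang tol : Int) : List Int → Int → Int → Int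
  | [], _, d => d
  | x :: r, k, d => if tol < |x - ang| then k else fwSpec ang tol r (k + 1) d

-- reference: last index (offset k) whose element is tol-far from ang, else e
def lastSpec (ang tol : Int) : List Int → Int → Int → Int
  | [], _, e => e
  | x :: r, k, e => lastSpec ang tol r (k + 1) (if tol < |x - ang| then k else e)

lemma lastSpec_append_singleton (ang tol : Int) (xs : List Int) (x k e : Int) :
    lastSpec ang tol (xs ++ [x]) k e
      = if tol < |x - ang| then k + xs.length else lastSpec ang tol xs k e := by
  induction xs generalizing k e with
  | nil => simp [lastSpec]
  | cons y r ih =>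
      simp only [List.cons_append, lastSpec, ih, List.length_cons]
      split_ifs <;> simp <;> ring

lemma pvFindFirst_fwd (elec : List Int) (ang tol d : Int) :
    ∀ k : Nat, k ≤ elec.length →
      pvFindFirst (PySem.List.pyRange (k : Int) (elec.length : Int) 1) elec ang tol d
        = fwSpec ang tol (elec.drop k) (k : Int) d := by
  intro k hk
  induction hn : elec.length - k generalizing k with
  | zero =>
      have hke : k = elec.length := by omega
      subst hke
      rw [PySem.List.pyRange_one_eq_nil (by omega)]
      simp [pvFindFirst, fwSpec]
  | succ m ih =>
      have hklt : k < elec.length := by omega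
      rw [PySem.List.pyRange_one_cons (by exact_mod_cast hklt)]
      have hd : elec.drop k = elec[k] :: elec.drop (k + 1) :=
        List.drop_eq_getElem_cons hklt
      have hget : PySem.List.pyGetD elec (k : Int) 0 = elec[k] := by
        simp [PySem.List.pyGetD_natCast, List.getElem?_eq_getElem hklt]
      have hcast : ((k : Int) + 1) = ((k + 1 : Nat) : Int) := by push_cast; ring
      simp only [pvFindFirst, hget, hd, fwSpec, hcast]
      rw [ih (k + 1) (by omega) (by omega)]

lemma pvFindFirst_bwd (elec : List Int) (ang tol d : Int) :
    ∀ j : Nat, j ≤ elec.length →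
      pvFindFirst (PySem.List.pyRange ((j : Int) - 1) (-1) (-1)) elec ang tol d
        = lastSpec ang tol (elec.take j) 0 d := by
  intro j hj
  induction j with
  | zero =>
      rw [show ((0 : Nat) : Int) - 1 = -1 by ring,
          PySem.List.pyRange_neg_one_eq_nil (by omega)]
      simp [pvFindFirst, lastSpec]
  | succ m ih =>
      have hmlt : m < elec.length := by omega
      have h1 : ((m + 1 : Nat) : Int) - 1 = (m : Int) := by push_cast; ring
      rw [h1, PySem.List.pyRange_neg_one_cons (by omega)]
      have htake : elec.take (m + 1) = elec.take m ++ [elec[m]] :=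
        List.take_succ_eq_append_getElem hmlt
      have hget : PySem.List.pyGetD elec (m : Int) 0 = elec[m] := by
        simp [PySem.List.pyGetD_natCast, List.getElem?_eq_getElem hmlt]
      have hlen : ((elec.take m).length : Int) = (m : Int) := by
        simp [List.length_take, Nat.min_eq_left (le_of_lt hmlt)]
      simp only [pvFindFirst, hget, htake, lastSpec_append_singleton, hlen, zero_add]
      rw [ih (by omega)]

lemma foldl_pvStep (ba ra bt rt : Int) (elec : List Int) :
    ∀ (k s0 e0 : Int) (f0 : Bool),
      (PySem.List.enumerate elec k).foldl (pvStep ba ra bt rt) (s0, f0, e0)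
        = (if f0 then s0 else fwSpec ba bt elec k s0,
           f0 || elec.any (fun x => decide (bt < |x - ba|)),
           lastSpec ra rt elec k e0) := by
  induction elec with
  | nil => intro k s0 e0 f0; simp [PySem.List.enumerate, fwSpec, lastSpec]
  | cons x r ih =>
      intro k s0 e0 f0
      have hcons : PySem.List.enumerate (x :: r) k = (k, x) :: PySem.List.enumerate r (k + 1) := by
        simp [PySem.List.enumerate]
      rw [hcons, List.foldl_cons]
      by_cases hP : bt < |x - ba| <;> by_cases hQ : rt < |x - ra| <;>
        cases f0 <;>
        simp [pvStep, hP, hQ, ih, fwSpec, lastSpec]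

-- ===== VERDICT (by name: the statement is the Claim_ definition above) =====
theorem filter_stable_regions_spec : Claim_equal_filter_stable_regions := by
  intro time elec ba ra bt rt _
  unfold Spec_filter_stable_regions filter_stable_regions filter_stable_regions_alt
  have h1 := pvFindFirst_fwd elec ba bt 0 0 (Nat.zero_le _)
  have h2 := pvFindFirst_bwd elec ra rt ((elec.length : Int) - 1) elec.length (le_refl _)
  push_cast at h1
  rw [List.drop_zero] at h1
  rw [List.take_length] at h2
  simp only [foldl_pvStep, h1, h2]
  simp
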